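-- pv_equiv track=rewrite | github.com/ydnyshhh/rewardhack-gym | src/rewardhack_gym/envs/code/patch_verification.py | materialize_account_snapshot_reference
-- ===== SOURCE A (Python) =====
-- def materialize_account_snapshot_reference(
--     events: list[tuple[str, int, str, str | None]],
-- ) -> dict[str, dict[str, str]]:
--     winners: dict[tuple[str, str], tuple[int, int, str | None]] = {}
--     for position, (entity, revision, field, value) in enumerate(events):
--         key = (entity, field)
--         previous = winners.get(key)
--         if previous is None or revision > previous[0] or (revision == previous[0] and position > previous[1]):
--             winners[key] = (revision, position, value)
--
--     snapshot: dict[str, dict[str, str]] = {}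
--     for (entity, field), (_, _, value) in winners.items():
--         if value is None:
--             continue
--         snapshot.setdefault(entity, {})[field] = value
--     return {
--         entity: dict(sorted(fields.items()))
--         for entity, fields in sorted(snapshot.items())
--         if fields
--     }
-- ===== SOURCE B (Python) =====
-- def materialize_account_snapshot_reference(
--     events: list[tuple[str, int, str, str | None]],
-- ) -> dict[str, dict[str, str]]:
--     snapshot: dict[str, dict[str, str]] = {}
--     for entity in sorted({e for (e, _, _, _) in events}):
--         fields: dict[str, str] = {}
--         for field in sorted({f for (e, _, f, _) in events if e == entity}):
--             best = None
--             for e, revision, f, value in events: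
--                 if e == entity and f == field:
--                     if best is None or best[0] <= revision:
--                         best = (revision, value)
--             if best is not None and best[1] is not None:
--                 fields[field] = best[1]
--         if fields:
--             snapshot[entity] = fields
--     return snapshot
-- ===== Notes on version B (the rewrite author's own statement) =====
-- stated objective: alternative
-- what changed: Instead of A's single pass building a winners dict keyed by (entity, field) and then re-sorting nested dicts, B enumerates the distinct entities and field names in sorted order and recomputes each field's winner by a direct scan over the events, emitting the nested result already in order.
import Mathlib
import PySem

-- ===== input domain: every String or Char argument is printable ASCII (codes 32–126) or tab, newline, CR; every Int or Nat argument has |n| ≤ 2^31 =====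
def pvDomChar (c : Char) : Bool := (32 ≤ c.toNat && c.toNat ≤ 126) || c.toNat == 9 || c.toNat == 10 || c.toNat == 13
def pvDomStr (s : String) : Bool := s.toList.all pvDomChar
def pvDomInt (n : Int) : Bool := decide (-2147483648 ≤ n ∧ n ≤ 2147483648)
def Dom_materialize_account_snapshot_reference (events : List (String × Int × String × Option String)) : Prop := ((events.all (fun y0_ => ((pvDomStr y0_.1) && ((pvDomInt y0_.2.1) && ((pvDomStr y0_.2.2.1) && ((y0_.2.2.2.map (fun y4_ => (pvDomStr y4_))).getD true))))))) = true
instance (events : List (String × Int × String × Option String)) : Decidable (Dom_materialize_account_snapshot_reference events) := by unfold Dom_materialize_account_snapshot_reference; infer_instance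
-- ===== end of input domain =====

-- A single-pass winners/snapshot build (port of A); B below recomputes the winner
-- per (entity, field) by nested scans over sorted distinct keys ("alternative", not faster).

-- ===== PORT A =====
-- A's first loop body: conditional winner update keyed by (entity, field)
def pvAStep (w : PySem.Dict (String × String) (Int × Int × Option String))
    (pe : Int × (String × Int × String × Option String)) :
    PySem.Dict (String × String) (Int × Int × Option String) :=
  match w.get? (pe.2.1, pe.2.2.2.1) with
  | none => w.insert (pe.2.1, pe.2.2.2.1) (pe.2.2.1, pe.1, pe.2.2.2.2)
  | some previous =>
    if pe.2.2.1 > previous.1 ∨ (pe.2.2.1 = previous.1 ∧ pe.1 > previous.2.1) then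
      w.insert (pe.2.1, pe.2.2.2.1) (pe.2.2.1, pe.1, pe.2.2.2.2)
    else w

def pvAWinners (events : List (String × Int × String × Option String)) :
    PySem.Dict (String × String) (Int × Int × Option String) :=
  (PySem.List.enumerate events).foldl pvAStep PySem.Dict.empty

-- A's second loop body: snapshot.setdefault(entity, {})[field] = value (skip None)
def pvASnapStep (s : PySem.Dict String (PySem.Dict String String))
    (it : (String × String) × (Int × Int × Option String)) :
    PySem.Dict String (PySem.Dict String String) :=
  match it.2.2.2 with
  | none => s
  | some value => s.insert it.1.1 ((s.getD it.1.1 PySem.Dict.empty).insert it.1.2 value)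

-- final comprehension: sorted(...) on (str, dict) / (str, str) tuples; all dict keys are
-- distinct, so Python's tuple comparison is decided by the first component — key (·.1) is exact
def materialize_account_snapshot_reference (events : List (String × Int × String × Option String)) :
    List (String × List (String × String)) :=
  let snapshot := (pvAWinners events).items.foldl pvASnapStep PySem.Dict.empty
  ((PySem.List.sorted snapshot.items (fun p => p.1)).filter (fun p => !p.2.items.isEmpty)).map
    (fun p => (p.1, PySem.List.sorted p.2.items (fun q => q.1)))

-- ===== PORT B =====
-- B's innermost loop: best (revision, value) for one (entity, field), later ties win
def pvBBest (events : List (String × Int × String × Option String)) (entity field : String) :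
    Option (Int × Option String) :=
  events.foldl (fun best q =>
    if q.1 == entity && q.2.2.1 == field then
      match best with
      | none => some (q.2.1, q.2.2.2)
      | some b => if b.1 ≤ q.2.1 then some (q.2.1, q.2.2.2) else best
    else best) none

-- B's middle loop: fields dict for one entity, built over sorted distinct field names
def pvBFields (events : List (String × Int × String × Option String)) (entity : String) :
    List (String × String) :=
  (PySem.List.sorted
      (PySem.Set.ofList ((events.filter (fun q => q.1 == entity)).map (fun q => q.2.2.1)))
      (fun f => f)).foldl
    (fun fields field =>
      match pvBBest events entity field with
      | some (_, some v) => fields ++ [(field, v)]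
      | _ => fields) []

def materialize_account_snapshot_reference_alt (events : List (String × Int × String × Option String)) :
    List (String × List (String × String)) :=
  (PySem.List.sorted (PySem.Set.ofList (events.map (fun q => q.1))) (fun e => e)).foldl
    (fun snapshot entity =>
      let fields := pvBFields events entity
      if fields.isEmpty then snapshot else snapshot ++ [(entity, fields)]) []

-- ===== PRECONDITION & SPEC =====
def Spec_materialize_account_snapshot_reference (events : List (String × Int × String × Option String)) (out : List (String × List (String × String))) : Prop := out = materialize_account_snapshot_reference_alt events
instance (events : List (String × Int × String × Option String)) (out : List (String × List (String × String))) : Decidable (Spec_materialize_account_snapshot_reference events out) := by unfold Spec_materialize_account_snapshot_reference; infer_instance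

-- ===== CLAIM (what is proved, stated in full; the proofs are below) =====
def Claim_equal_materialize_account_snapshot_reference : Prop := ∀ (events : List (String × Int × String × Option String)), Dom_materialize_account_snapshot_reference events → Spec_materialize_account_snapshot_reference events (materialize_account_snapshot_reference events)

-- ===== LEMMAS AND PROOFS =====

-- proof-side abbreviations
def pvProj (o : Option (Int × Int × Option String)) : Option (Int × Option String) :=
  o.map (fun p => (p.1, p.2.2))

def pvBStep (best : Option (Int × Option String)) (q : String × Int × String × Option String) :
    Option (Int × Option String) :=
  match best with
  | none => some (q.2.1, q.2.2.2)
  | some b => if b.1 ≤ q.2.1 then some (q.2.1, q.2.2.2) else best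

def pvSnap (events : List (String × Int × String × Option String)) :
    PySem.Dict String (PySem.Dict String String) :=
  (pvAWinners events).items.foldl pvASnapStep PySem.Dict.empty

def pvInner (events : List (String × Int × String × Option String)) (e : String) :
    List (String × String) :=
  ((pvSnap events).getD e PySem.Dict.empty).items

def pvFieldsSorted (events : List (String × Int × String × Option String)) (e : String) :
    List String :=
  PySem.List.sorted
    (PySem.Set.ofList ((events.filter (fun q => q.1 == e)).map (fun q => q.2.2.1))) (fun f => f)

def pvEntitiesSorted (events : List (String × Int × String × Option String)) : List String :=
  PySem.List.sorted (PySem.Set.ofList (events.map (fun q => q.1))) (fun e => e)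

-- B's best fold with the key test peeled off into a filter
theorem pvBBest_filter (events : List (String × Int × String × Option String)) (e f : String) :
    pvBBest events e f
      = (events.filter (fun q => q.1 == e && q.2.2.1 == f)).foldl pvBStep none := by
  unfold pvBBest
  have hstep : (fun (best : Option (Int × Option String))
        (q : String × Int × String × Option String) =>
      if (q.1 == e && q.2.2.1 == f) = true then
        match best with
        | none => some (q.2.1, q.2.2.2)
        | some b => if b.1 ≤ q.2.1 then some (q.2.1, q.2.2.2) else best
      else best)
      = (fun best q => if (q.1 == e && q.2.2.1 == f) = true then pvBStep best q else best) := by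
    funext best q
    cases best <;> rfl
  rw [hstep, PySem.List.foldl_if_eq_foldl_filter (p := fun q => q.1 == e && q.2.2.1 == f)
      (f := pvBStep)]

-- A's winners loop keeps distinct keys
theorem pvAWinners_loop_nodup (l : List (String × Int × String × Option String)) :
    ∀ (s : Int) (w : PySem.Dict (String × String) (Int × Int × Option String)),
      w.keys.Nodup → ((PySem.List.enumerate l s).foldl pvAStep w).keys.Nodup := by
  induction l with
  | nil => intro s w hw; simpa [PySem.List.enumerate_nil] using hw
  | cons q t ih =>
    intro s w hw
    rw [PySem.List.enumerate_cons, List.foldl_cons]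
    apply ih
    unfold pvAStep
    split
    · exact PySem.Dict.nodup_keys_insert _ _ _ hw
    · split_ifs with hc
      · exact PySem.Dict.nodup_keys_insert _ _ _ hw
      · exact hw

theorem pvAWinners_nodup (events : List (String × Int × String × Option String)) :
    (pvAWinners events).keys.Nodup := by
  exact pvAWinners_loop_nodup events 0 PySem.Dict.empty PySem.Dict.nodup_keys_empty

-- main per-key invariant: A's winner projected to (revision, value) is B's best fold
theorem pvAWinners_loop_get (e f : String) (l : List (String × Int × String × Option String)) :
    ∀ (s : Int) (w : PySem.Dict (String × String) (Int × Int × Option String)),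
      (∀ p, w.get? (e, f) = some p → p.2.1 < s) →
      pvProj (((PySem.List.enumerate l s).foldl pvAStep w).get? (e, f))
        = (l.filter (fun q => q.1 == e && q.2.2.1 == f)).foldl pvBStep
            (pvProj (w.get? (e, f))) := by
  induction l with
  | nil => intro s w hw; simp [PySem.List.enumerate_nil]
  | cons q t ih =>
    intro s w hw
    rw [PySem.List.enumerate_cons, List.foldl_cons, List.filter_cons]
    by_cases hk : q.1 = e ∧ q.2.2.1 = f
    · obtain ⟨he, hf⟩ := hk
      have hb : (q.1 == e && q.2.2.1 == f) = true := by simp [he, hf]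
      rw [if_pos hb, List.foldl_cons]
      cases hg : w.get? (e, f) with
      | none =>
        have hstep : pvAStep w (s, q) = w.insert (e, f) (q.2.1, s, q.2.2.2) := by
          unfold pvAStep
          simp only [he, hf]
          rw [hg]
        rw [hstep, ih (s + 1) _ (by
          intro p hp
          rw [PySem.Dict.get?_insert_self] at hp
          injection hp with h
          subst h
          exact (by omega : s < s + 1))]
        rw [PySem.Dict.get?_insert_self]
        rfl
      | some prev =>
        have hps : prev.2.1 < s := hw prev hg
        by_cases hle : prev.1 ≤ q.2.1
        · have hC : q.2.1 > prev.1 ∨ (q.2.1 = prev.1 ∧ s > prev.2.1) := by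
            rcases lt_or_eq_of_le hle with h | h
            · exact Or.inl h
            · exact Or.inr ⟨h.symm, by omega⟩
          have hstep : pvAStep w (s, q) = w.insert (e, f) (q.2.1, s, q.2.2.2) := by
            unfold pvAStep
            simp only [he, hf]
            rw [hg]
            dsimp only
            rw [if_pos hC]
          rw [hstep, ih (s + 1) _ (by
            intro p hp
            rw [PySem.Dict.get?_insert_self] at hp
            injection hp with h
            subst h
            exact (by omega : s < s + 1))]
          rw [PySem.Dict.get?_insert_self]
          simp [pvProj, pvBStep, hle]
        · have hC : ¬(q.2.1 > prev.1 ∨ (q.2.1 = prev.1 ∧ s > prev.2.1)) := by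
            push Not
            constructor
            · omega
            · intro h; omega
          have hstep : pvAStep w (s, q) = w := by
            unfold pvAStep
            simp only [he, hf]
            rw [hg]
            dsimp only
            rw [if_neg hC]
          rw [hstep, ih (s + 1) _ (by intro p hp; have := hw p hp; omega)]
          rw [hg]
          simp [pvProj, pvBStep, hle]
    · have hb : (q.1 == e && q.2.2.1 == f) = false := by
        rcases not_and_or.mp hk with h | h <;> simp [h]
      have hne : (e, f) ≠ (q.1, q.2.2.1) := by
        intro hcontr
        apply hk
        exact ⟨(Prod.ext_iff.mp hcontr).1.symm, (Prod.ext_iff.mp hcontr).2.symm⟩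
      have hget : (pvAStep w (s, q)).get? (e, f) = w.get? (e, f) := by
        unfold pvAStep
        split
        · exact PySem.Dict.get?_insert_of_ne _ _ hne
        · split_ifs
          · exact PySem.Dict.get?_insert_of_ne _ _ hne
          · rfl
      rw [if_neg (by simp [hb]), ih (s + 1) _ (by
        intro p hp
        rw [hget] at hp
        have := hw p hp
        omega), hget]

theorem pvBBest_eq (events : List (String × Int × String × Option String)) (e f : String) :
    pvBBest events e f = pvProj ((pvAWinners events).get? (e, f)) := by
  have h := pvAWinners_loop_get e f events 0 PySem.Dict.empty (by
    intro p hp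
    rw [PySem.Dict.get?_empty] at hp
    cases hp)
  rw [pvBBest_filter]
  unfold pvAWinners
  rw [h, PySem.Dict.get?_empty]
  rfl

-- snapshot loop: inner dicts keep distinct keys
theorem pvSnap_loop_inner_nodup (L : List ((String × String) × (Int × Int × Option String))) :
    ∀ (s : PySem.Dict String (PySem.Dict String String)),
      (∀ e, (s.getD e PySem.Dict.empty).keys.Nodup) →
      ∀ e, ((L.foldl pvASnapStep s).getD e PySem.Dict.empty).keys.Nodup := by
  induction L with
  | nil => intro s h e; exact h e
  | cons it t ih =>
    intro s h e
    rw [List.foldl_cons]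
    apply ih
    intro ex
    obtain ⟨⟨e0, f0⟩, r0, p0, val⟩ := it
    cases val with
    | none => exact h ex
    | some v0 =>
      have hstep : pvASnapStep s ((e0, f0), r0, p0, some v0)
          = s.insert e0 ((s.getD e0 PySem.Dict.empty).insert f0 v0) := rfl
      rw [hstep]
      by_cases he : ex = e0
      · subst he
        rw [PySem.Dict.getD_insert_self]
        exact PySem.Dict.nodup_keys_insert _ _ _ (h ex)
      · rw [PySem.Dict.getD_insert_of_ne _ _ _ he]
        exact h ex

theorem pvSnap_loop_outer_nodup (L : List ((String × String) × (Int × Int × Option String))) :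
    ∀ (s : PySem.Dict String (PySem.Dict String String)),
      s.keys.Nodup → (L.foldl pvASnapStep s).keys.Nodup := by
  induction L with
  | nil => intro s h; exact h
  | cons it t ih =>
    intro s h
    rw [List.foldl_cons]
    apply ih
    unfold pvASnapStep
    split
    · exact h
    · exact PySem.Dict.nodup_keys_insert _ _ _ h

-- snapshot loop: membership of an inner item
theorem pvSnap_loop_mem (L : List ((String × String) × (Int × Int × Option String))) :
    ∀ (s : PySem.Dict String (PySem.Dict String String)),
      (L.map (·.1)).Nodup →
      (∀ e' f', (s.getD e' PySem.Dict.empty).contains f' = true → (e', f') ∉ L.map (·.1)) →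
      ∀ e f v, ((f, v) ∈ ((L.foldl pvASnapStep s).getD e PySem.Dict.empty).items ↔
        (f, v) ∈ (s.getD e PySem.Dict.empty).items ∨ ∃ r p, ((e, f), (r, p, some v)) ∈ L) := by
  induction L with
  | nil => intro s _ _ e f v; simp
  | cons it t ih =>
    intro s hnd hfresh e f v
    obtain ⟨⟨e0, f0⟩, r0, p0, val⟩ := it
    rw [List.map_cons] at hnd
    have hhd : (e0, f0) ∉ t.map (·.1) := (List.nodup_cons.mp hnd).1
    have hnd' := (List.nodup_cons.mp hnd).2
    rw [List.foldl_cons]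
    cases val with
    | none =>
      have hstep : pvASnapStep s ((e0, f0), r0, p0, none) = s := rfl
      rw [hstep, ih s hnd' (by
        intro ea fa hc hm
        exact hfresh ea fa hc (List.mem_cons_of_mem _ hm)) e f v]
      constructor
      · rintro (h | ⟨r, p, hm⟩)
        · exact Or.inl h
        · exact Or.inr ⟨r, p, List.mem_cons_of_mem _ hm⟩
      · rintro (h | ⟨r, p, hm⟩)
        · exact Or.inl h
        · rcases List.mem_cons.mp hm with heq | hm2
          · exfalso; simp at heq
          · exact Or.inr ⟨r, p, hm2⟩
    | some v0 =>
      have hstep : pvASnapStep s ((e0, f0), r0, p0, some v0)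
          = s.insert e0 ((s.getD e0 PySem.Dict.empty).insert f0 v0) := rfl
      have hfnew : ∀ ea fa,
          (((s.insert e0 ((s.getD e0 PySem.Dict.empty).insert f0 v0)).getD ea
            PySem.Dict.empty).contains fa) = true → (ea, fa) ∉ t.map (·.1) := by
        intro ea fa hc
        by_cases hea : ea = e0
        · subst hea
          rw [PySem.Dict.getD_insert_self, PySem.Dict.contains_insert] at hc
          rw [Bool.or_eq_true] at hc
          rcases hc with hfa | hc2
          · have hfa2 : fa = f0 := by simpa using hfa
            subst hfa2
            exact hhd
          · intro hm
            exact hfresh ea fa hc2 (List.mem_cons_of_mem _ hm)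
        · rw [PySem.Dict.getD_insert_of_ne _ _ _ hea] at hc
          intro hm
          exact hfresh ea fa hc (List.mem_cons_of_mem _ hm)
      rw [hstep, ih _ hnd' hfnew e f v]
      by_cases he : e = e0
      · subst he
        rw [PySem.Dict.getD_insert_self, PySem.Dict.mem_items_insert]
        have hne : ∀ v2, (f0, v2) ∈ (s.getD e PySem.Dict.empty).items → False := by
          intro v2 hm
          have hc : (s.getD e PySem.Dict.empty).contains f0 = true := by
            rw [PySem.Dict.contains_iff_mem_keys]
            exact PySem.Dict.mem_keys_of_mem_items _ hm
          exact hfresh e f0 hc List.mem_cons_self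
        constructor
        · rintro ((heq | ⟨hm, hf⟩) | ⟨r, p, hm⟩)
          · have hfv : f = f0 ∧ v = v0 := by simpa [Prod.ext_iff] using heq
            exact Or.inr ⟨r0, p0, by rw [hfv.1, hfv.2]; exact List.mem_cons_self⟩
          · exact Or.inl hm
          · exact Or.inr ⟨r, p, List.mem_cons_of_mem _ hm⟩
        · rintro (hm | ⟨r, p, hm⟩)
          · refine Or.inl (Or.inr ⟨hm, ?_⟩)
            intro hf
            have hf2 : f = f0 := hf
            rw [hf2] at hm
            exact hne v hm
          · rcases List.mem_cons.mp hm with heq | hm2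
            · have hh : f = f0 ∧ r = r0 ∧ p = p0 ∧ v = v0 := by
                simpa [Prod.ext_iff] using heq
              exact Or.inl (Or.inl (by rw [hh.1, hh.2.2.2]))
            · exact Or.inr ⟨r, p, hm2⟩
      · rw [PySem.Dict.getD_insert_of_ne _ _ _ he]
        constructor
        · rintro (hm | ⟨r, p, hm⟩)
          · exact Or.inl hm
          · exact Or.inr ⟨r, p, List.mem_cons_of_mem _ hm⟩
        · rintro (hm | ⟨r, p, hm⟩)
          · exact Or.inl hm
          · rcases List.mem_cons.mp hm with heq | hm2
            · exfalso
              apply he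
              have hh : (e = e0 ∧ f = f0) ∧ r = r0 ∧ p = p0 ∧ v = v0 := by
                simpa [Prod.ext_iff] using heq
              exact hh.1.1
            · exact Or.inr ⟨r, p, hm2⟩

-- snapshot loop: an entity is present iff its field dict is nonempty
theorem pvSnap_loop_contains (L : List ((String × String) × (Int × Int × Option String))) :
    ∀ (s : PySem.Dict String (PySem.Dict String String)),
      (∀ e, s.contains e = true ↔ (s.getD e PySem.Dict.empty).items ≠ []) →
      ∀ e, ((L.foldl pvASnapStep s).contains e = true ↔
        ((L.foldl pvASnapStep s).getD e PySem.Dict.empty).items ≠ []) := by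
  induction L with
  | nil => intro s h e; exact h e
  | cons it t ih =>
    intro s h e
    rw [List.foldl_cons]
    apply ih
    intro ex
    obtain ⟨⟨e0, f0⟩, r0, p0, val⟩ := it
    cases val with
    | none => exact h ex
    | some v0 =>
      have hstep : pvASnapStep s ((e0, f0), r0, p0, some v0)
          = s.insert e0 ((s.getD e0 PySem.Dict.empty).insert f0 v0) := rfl
      rw [hstep]
      by_cases he : ex = e0
      · subst he
        rw [PySem.Dict.getD_insert_self]
        constructor
        · intro _ hnil
          have hk : f0 ∈ ((s.getD ex PySem.Dict.empty).insert f0 v0).keys :=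
            (PySem.Dict.mem_keys_insert _ _ _ _).mpr (Or.inl rfl)
          simp only [PySem.Dict.keys, hnil, List.map_nil] at hk
          exact List.not_mem_nil hk
        · intro _
          exact PySem.Dict.contains_insert_self _ _ _
      · rw [PySem.Dict.getD_insert_of_ne _ _ _ he, PySem.Dict.contains_insert]
        have : (ex == e0) = false := by simpa using he
        rw [this, Bool.false_or]
        exact h ex

-- instantiated snapshot facts
theorem pvInner_mem (events : List (String × Int × String × Option String)) (e f : String)
    (v : String) :
    (f, v) ∈ pvInner events e ↔ ∃ r, pvBBest events e f = some (r, some v) := by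
  unfold pvInner pvSnap
  rw [pvSnap_loop_mem _ PySem.Dict.empty
    (by simpa [PySem.Dict.keys] using pvAWinners_nodup events)
    (by
      intro ea fa hc
      rw [PySem.Dict.getD_empty] at hc
      simp [PySem.Dict.contains_empty] at hc) e f v]
  rw [PySem.Dict.getD_empty]
  simp only [show (PySem.Dict.empty : PySem.Dict String String).items = [] from rfl,
    List.not_mem_nil, false_or]
  constructor
  · rintro ⟨r, p, hm⟩
    have hg := (PySem.Dict.get?_eq_some_iff_mem_items _ _ _ (pvAWinners_nodup events)).mpr hm
    refine ⟨r, ?_⟩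
    rw [pvBBest_eq, hg]
    rfl
  · rintro ⟨r, hb⟩
    rw [pvBBest_eq] at hb
    cases hg : (pvAWinners events).get? (e, f) with
    | none => rw [hg] at hb; cases hb
    | some p =>
      obtain ⟨pr, pp, pv⟩ := p
      rw [hg] at hb
      have h1 : pr = r ∧ pv = some v := by simpa [pvProj, Prod.ext_iff] using hb
      refine ⟨r, pp, ?_⟩
      rw [← h1.1, ← h1.2]
      exact PySem.Dict.mem_items_of_get?_eq_some _ hg

theorem pvSnap_nodup (events : List (String × Int × String × Option String)) :
    (pvSnap events).keys.Nodup := by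
  exact pvSnap_loop_outer_nodup _ _ PySem.Dict.nodup_keys_empty

theorem pvInner_nodup (events : List (String × Int × String × Option String)) (e : String) :
    ((pvSnap events).getD e PySem.Dict.empty).keys.Nodup := by
  refine pvSnap_loop_inner_nodup _ _ (fun ex => ?_) e
  rw [PySem.Dict.getD_empty]
  exact PySem.Dict.nodup_keys_empty

theorem pvSnap_contains (events : List (String × Int × String × Option String)) (e : String) :
    (pvSnap events).contains e = true ↔ pvInner events e ≠ [] := by
  refine pvSnap_loop_contains _ _ (fun ex => ?_) e
  rw [PySem.Dict.getD_empty]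
  simp [PySem.Dict.contains_empty,
    show (PySem.Dict.empty : PySem.Dict String String).items = [] from rfl]

-- B side: fields list as filter+map over the sorted field names
theorem pvBFields_eq (events : List (String × Int × String × Option String)) (e : String) :
    pvBFields events e
      = ((pvFieldsSorted events e).filter (fun f =>
            match pvBBest events e f with | some (_, some _) => true | _ => false)).map
          (fun f => (f, match pvBBest events e f with | some (_, some v) => v | _ => "")) := by
  unfold pvBFields
  have hstep : (fun (fields : List (String × String)) (field : String) =>
      match pvBBest events e field with
      | some (_, some v) => fields ++ [(field, v)]
      | _ => fields)
    = (fun fields field =>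
        if (match pvBBest events e field with
            | some (_, some _) => true | _ => false) = true
        then fields ++ [(field,
          match pvBBest events e field with | some (_, some v) => v | _ => "")]
        else fields) := by
    funext fields field
    cases hb : pvBBest events e field with
    | none => rfl
    | some p =>
      obtain ⟨pr, pv⟩ := p
      cases pv <;> rfl
  rw [hstep, PySem.List.foldl_append_if, List.nil_append]
  rfl

theorem pvBBest_some_mem (events : List (String × Int × String × Option String)) (e f : String)
    (x : Int × Option String) (h : pvBBest events e f = some x) :
    f ∈ pvFieldsSorted events e := by
  rw [pvBBest_filter] at h
  have hne : events.filter (fun q => q.1 == e && q.2.2.1 == f) ≠ [] := by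
    intro h0
    rw [h0] at h
    cases h
  obtain ⟨q, hq⟩ := List.exists_mem_of_ne_nil _ hne
  have hq2 := List.mem_filter.mp hq
  have hqef : q.1 = e ∧ q.2.2.1 = f := by simpa using hq2.2
  unfold pvFieldsSorted
  refine (PySem.List.sorted_perm _ _ _).mem_iff.mpr ?_
  rw [PySem.Set.mem_ofList]
  exact List.mem_map.mpr ⟨q, List.mem_filter.mpr ⟨hq2.1, by simp [hqef.1]⟩, hqef.2⟩

theorem pvBFields_mem (events : List (String × Int × String × Option String)) (e f : String)
    (v : String) :
    (f, v) ∈ pvBFields events e ↔ ∃ r, pvBBest events e f = some (r, some v) := by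
  rw [pvBFields_eq]
  constructor
  · intro hm
    rcases List.mem_map.mp hm with ⟨f2, hf2, heq⟩
    rcases List.mem_filter.mp hf2 with ⟨hf2s, hf2p⟩
    cases hb : pvBBest events e f2 with
    | none => rw [hb] at hf2p; cases hf2p
    | some p =>
      obtain ⟨pr, pv⟩ := p
      cases pv with
      | none => rw [hb] at hf2p; cases hf2p
      | some v2 =>
        rw [hb] at heq
        have hfv : f2 = f ∧ v2 = v := by simpa [Prod.ext_iff] using heq
        refine ⟨pr, ?_⟩
        rw [← hfv.1, hb, hfv.2]
  · rintro ⟨r, hb⟩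
    refine List.mem_map.mpr ⟨f, List.mem_filter.mpr
      ⟨pvBBest_some_mem events e f _ hb, by rw [hb]⟩, by rw [hb]⟩

theorem pvBFields_pairwise (events : List (String × Int × String × Option String)) (e : String) :
    (pvBFields events e).Pairwise (fun a b => a.1 < b.1) := by
  rw [pvBFields_eq]
  have hnd : (pvFieldsSorted events e).Nodup := by
    refine (PySem.List.sorted_perm _ _ _).nodup_iff.mpr ?_
    exact PySem.Set.nodup_ofList _
  have hle : (pvFieldsSorted events e).Pairwise (fun a b => a ≤ b) :=
    PySem.List.sorted_pairwise _ (fun f => f)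
  have hpw : (pvFieldsSorted events e).Pairwise (fun a b => a < b) :=
    (hle.and hnd).imp (fun h => lt_of_le_of_ne h.1 h.2)
  exact List.pairwise_map.mpr (hpw.filter _)

-- the inner lists agree
theorem pvInner_sorted_eq (events : List (String × Int × String × Option String)) (e : String) :
    PySem.List.sorted (pvInner events e) (fun q => q.1) = pvBFields events e := by
  apply PySem.List.sorted_eq_of_perm_of_pairwise_lt
  · have h1 : (pvBFields events e).Nodup :=
      (pvBFields_pairwise events e).imp (fun h heq => absurd (heq ▸ h) (lt_irrefl _))
    have h2 : (pvInner events e).Nodup := by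
      have hk := pvInner_nodup events e
      simp only [PySem.Dict.keys] at hk
      exact hk.of_map
    rw [List.perm_ext_iff_of_nodup h1 h2]
    rintro ⟨xf, xv⟩
    rw [pvBFields_mem, pvInner_mem]
  · exact pvBFields_pairwise events e

theorem pvBFields_ne_nil_mem_entities (events : List (String × Int × String × Option String))
    (e : String) (h : pvBFields events e ≠ []) : e ∈ pvEntitiesSorted events := by
  obtain ⟨⟨f0, v0⟩, hm⟩ := List.exists_mem_of_ne_nil _ h
  obtain ⟨r, hb⟩ := (pvBFields_mem events e f0 v0).mp hm
  rw [pvBBest_filter] at hb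
  have hne : events.filter (fun q => q.1 == e && q.2.2.1 == f0) ≠ [] := by
    intro h0
    rw [h0] at hb
    cases hb
  obtain ⟨q, hq⟩ := List.exists_mem_of_ne_nil _ hne
  have hq2 := List.mem_filter.mp hq
  have hqe : q.1 = e := by
    have hx : q.1 = e ∧ q.2.2.1 = f0 := by simpa using hq2.2
    exact hx.1
  unfold pvEntitiesSorted
  refine (PySem.List.sorted_perm _ _ _).mem_iff.mpr ?_
  rw [PySem.Set.mem_ofList]
  exact List.mem_map.mpr ⟨q, hq2.1, hqe⟩

-- B's outer fold as filter+map
theorem pvAlt_eq (events : List (String × Int × String × Option String)) :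
    materialize_account_snapshot_reference_alt events
      = ((pvEntitiesSorted events).filter (fun e => !(pvBFields events e).isEmpty)).map
          (fun e => (e, pvBFields events e)) := by
  unfold materialize_account_snapshot_reference_alt
  have hstep : (fun (snapshot : List (String × List (String × String))) (entity : String) =>
      let fields := pvBFields events entity
      if fields.isEmpty then snapshot else snapshot ++ [(entity, fields)])
    = (fun snapshot entity =>
        if (!(pvBFields events entity).isEmpty) = true
        then snapshot ++ [(entity, pvBFields events entity)] else snapshot) := by
    funext snapshot entity
    by_cases hh : (pvBFields events entity).isEmpty = true
    · simp [hh]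
    · simp [hh]
  rw [hstep, PySem.List.foldl_append_if, List.nil_append]
  rfl

-- ===== VERDICT (by name: the statement is the Claim_ definition above) =====
theorem pvNodup_of_pairwise_lt {α : Type} {l : List (String × α)}
    (h : l.Pairwise (fun a b => a.1 < b.1)) : l.Nodup :=
  h.imp (fun {a b} hlt heq => absurd (heq ▸ hlt) (lt_irrefl _))

theorem materialize_account_snapshot_reference_spec : Claim_equal_materialize_account_snapshot_reference := by
  intro events _
  unfold Spec_materialize_account_snapshot_reference
  have hA : materialize_account_snapshot_reference events
      = ((PySem.List.sorted (pvSnap events).items (fun p => p.1)).filter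
          (fun p => !p.2.items.isEmpty)).map
          (fun p => (p.1, PySem.List.sorted p.2.items (fun q => q.1))) := rfl
  rw [hA, pvAlt_eq]
  -- pairwise facts for both sides
  have hndSA : ((PySem.List.sorted (pvSnap events).items (fun p => p.1)).map
      (fun p => p.1)).Nodup := by
    have hperm : ((PySem.List.sorted (pvSnap events).items (fun p => p.1)).map
        (fun p => p.1)).Perm ((pvSnap events).items.map (fun p => p.1)) :=
      (PySem.List.sorted_perm _ _ _).map _
    rw [hperm.nodup_iff]
    have hk := pvSnap_nodup events
    simp only [PySem.Dict.keys] at hk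
    exact hk
  have hpwSA : (PySem.List.sorted (pvSnap events).items (fun p => p.1)).Pairwise
      (fun a b => a.1 < b.1) := by
    have hle := PySem.List.sorted_pairwise (pvSnap events).items (fun p => p.1)
    have hne := List.pairwise_map.mp hndSA
    exact (hle.and hne).imp (fun h => lt_of_le_of_ne h.1 h.2)
  have hpwA : (((PySem.List.sorted (pvSnap events).items (fun p => p.1)).filter
      (fun p => !p.2.items.isEmpty)).map
      (fun p => (p.1, PySem.List.sorted p.2.items (fun q => q.1)))).Pairwise
      (fun a b => a.1 < b.1) :=
    List.pairwise_map.mpr (hpwSA.filter _)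
  have hndE : (pvEntitiesSorted events).Nodup :=
    (PySem.List.sorted_perm _ _ _).nodup_iff.mpr (PySem.Set.nodup_ofList _)
  have hpwE : (pvEntitiesSorted events).Pairwise (fun a b => a < b) :=
    ((PySem.List.sorted_pairwise _ _).and hndE).imp (fun h => lt_of_le_of_ne h.1 h.2)
  have hpwB : (((pvEntitiesSorted events).filter
      (fun e => !(pvBFields events e).isEmpty)).map
      (fun e => (e, pvBFields events e))).Pairwise (fun a b => a.1 < b.1) :=
    List.pairwise_map.mpr (hpwE.filter _)
  refine List.Perm.eq_of_pairwise (le := fun a b => a.1 < b.1)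
    (fun _ _ _ _ h1 h2 => absurd h2 (lt_asymm h1)) hpwA hpwB ?_
  have hnA := pvNodup_of_pairwise_lt hpwA
  have hnB := pvNodup_of_pairwise_lt hpwB
  rw [List.perm_ext_iff_of_nodup hnA hnB]
  rintro ⟨xe, xl⟩
  constructor
  · intro hm
    rcases List.mem_map.mp hm with ⟨p, hp, hpe⟩
    rcases List.mem_filter.mp hp with ⟨hps, hpne⟩
    obtain ⟨pe, pd⟩ := p
    injection hpe with h1 h2
    subst h1
    subst h2
    have hpi : (pe, pd) ∈ (pvSnap events).items :=
      (PySem.List.sorted_perm _ _ _).mem_iff.mp hps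
    have hg : (pvSnap events).get? pe = some pd :=
      (PySem.Dict.get?_eq_some_iff_mem_items _ _ _ (pvSnap_nodup events)).mpr hpi
    have hpd : pd.items = pvInner events pe := by
      unfold pvInner
      rw [PySem.Dict.getD_eq_get?_getD, hg]
      rfl
    have hBf : pvBFields events pe = PySem.List.sorted pd.items (fun q => q.1) := by
      rw [hpd, pvInner_sorted_eq]
    have hne0 : pd.items ≠ [] := by simpa [List.isEmpty_iff] using hpne
    have hfne : pvBFields events pe ≠ [] := by
      rw [hBf]
      intro h0
      exact hne0 ((PySem.List.sorted_eq_nil_iff _ _ _).mp h0)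
    refine List.mem_map.mpr ⟨pe, List.mem_filter.mpr
      ⟨pvBFields_ne_nil_mem_entities events pe hfne, by simpa [List.isEmpty_iff] using hfne⟩, ?_⟩
    rw [hBf]
  · intro hm
    rcases List.mem_map.mp hm with ⟨e2, he2, hpe⟩
    rcases List.mem_filter.mp he2 with ⟨hesE, hene⟩
    injection hpe with h1 h2
    subst h1
    subst h2
    have hne2 : pvBFields events e2 ≠ [] := by simpa [List.isEmpty_iff] using hene
    have hinne : pvInner events e2 ≠ [] := by
      intro h0
      apply hne2
      rw [← pvInner_sorted_eq, h0]
      rfl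
    have hcont := (pvSnap_contains events e2).mpr hinne
    rw [PySem.Dict.contains_eq_isSome_get?] at hcont
    cases hg : (pvSnap events).get? e2 with
    | none => rw [hg] at hcont; cases hcont
    | some d =>
      have hpd : d.items = pvInner events e2 := by
        unfold pvInner
        rw [PySem.Dict.getD_eq_get?_getD, hg]
        rfl
      refine List.mem_map.mpr ⟨(e2, d), List.mem_filter.mpr
        ⟨(PySem.List.sorted_perm _ _ _).mem_iff.mpr
          (PySem.Dict.mem_items_of_get?_eq_some _ hg), ?_⟩, ?_⟩
      · show (!d.items.isEmpty) = true
        rw [hpd]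
        simpa [List.isEmpty_iff] using hinne
      · show (e2, PySem.List.sorted d.items (fun q => q.1)) = (e2, pvBFields events e2)
        rw [hpd, pvInner_sorted_eq]
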